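-- pv_equiv track=rewrite | github.com/apatil241995/Python-practice-problems-Week-7 | 04-04-2022/77 sum of missing no/sum_of_missing_no.py | missing_no_sum
-- ===== SOURCE A (Python) =====
-- def missing_no_sum(lis):
--   missing_nos = []
--   sum = 0
--   if len(lis) > 0:
--     for i in range(lis[-1]):
--       if i+1 in lis:
--         continue
--       else:
--         missing_nos.append(i+1)
--     for j in missing_nos:
--       sum += j
--     return f"Sum of missing nos {sum}"
--   else:
--     return "Entered list is empty"
-- ===== SOURCE B (Python) =====
-- def missing_no_sum(lis):
--   if not lis:
--     return "Entered list is empty"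
--   last = lis[-1]
--   n = last if last > 0 else 0
--   present = {x for x in lis if 1 <= x <= n}
--   s = n * (n + 1) // 2 - sum(present)
--   return f"Sum of missing nos {s}"
-- ===== Notes on version B (the rewrite author's own statement) =====
-- stated objective: faster
-- what changed: Replaces the O(max*n) loop (linear membership scan per number up to lis[-1]) by the closed-form Gauss sum n(n+1)/2 minus the sum of the distinct list elements lying in 1..n, built via one set comprehension.
import Mathlib
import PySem

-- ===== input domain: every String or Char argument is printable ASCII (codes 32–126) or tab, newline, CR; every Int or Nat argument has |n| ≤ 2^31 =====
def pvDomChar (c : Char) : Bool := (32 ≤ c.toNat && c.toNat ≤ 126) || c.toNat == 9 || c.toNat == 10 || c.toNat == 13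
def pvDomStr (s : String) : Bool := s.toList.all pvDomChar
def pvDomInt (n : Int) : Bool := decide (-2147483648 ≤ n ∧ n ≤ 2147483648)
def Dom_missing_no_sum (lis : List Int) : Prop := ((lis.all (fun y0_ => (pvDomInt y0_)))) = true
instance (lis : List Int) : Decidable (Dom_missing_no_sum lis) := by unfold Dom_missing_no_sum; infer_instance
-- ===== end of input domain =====

-- B replaces A's O(max·n) membership loop by the closed-form Gauss sum n(n+1)/2
-- minus the sum of the distinct list elements in 1..n (one set comprehension).

-- ===== PORT A =====
def missing_no_sum (lis : List Int) : String :=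
  let missing_nos : List Int := []
  let sum : Int := 0
  if lis.length > 0 then
    let last : Int := (PySem.List.pyGet? lis (-1)).getD 0   -- lis[-1]; list nonempty here, so pyGet? is some
    let missing_nos := (PySem.List.pyRange 0 last 1).foldl
      (fun acc i => if (i + 1) ∈ lis then acc else acc ++ [i + 1]) missing_nos
    let sum := missing_nos.foldl (fun s j => s + j) sum
    "Sum of missing nos " ++ PySem.Int.toStr sum
  else
    "Entered list is empty"

-- ===== PORT B =====
def missing_no_sum_alt (lis : List Int) : String :=
  if lis.isEmpty then
    "Entered list is empty"
  else
    let last : Int := (PySem.List.pyGet? lis (-1)).getD 0   -- lis[-1]; list nonempty here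
    let n : Int := if last > 0 then last else 0
    let present : PySem.Set Int := PySem.Set.ofList (lis.filter (fun x => 1 ≤ x && x ≤ n))
    let s : Int := PySem.Int.floordiv (n * (n + 1)) 2 - present.sum
    "Sum of missing nos " ++ PySem.Int.toStr s

-- ===== PRECONDITION & SPEC =====
def Spec_missing_no_sum (lis : List Int) (out : String) : Prop := out = missing_no_sum_alt lis
instance (lis : List Int) (out : String) : Decidable (Spec_missing_no_sum lis out) := by unfold Spec_missing_no_sum; infer_instance

-- ===== CLAIM (what is proved, stated in full; the proofs are below) =====
def Claim_equal_missing_no_sum : Prop := ∀ (lis : List Int), Dom_missing_no_sum lis → Spec_missing_no_sum lis (missing_no_sum lis)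

-- ===== LEMMAS AND PROOFS =====

-- A's skip-loop: append i+1 unless i+1 ∈ lis
theorem foldl_skip_append (lis l acc : List Int) :
    l.foldl (fun acc i => if (i + 1) ∈ lis then acc else acc ++ [i + 1]) acc
      = acc ++ (l.filter (fun i => decide (¬ (i + 1) ∈ lis))).map (· + 1) := by
  induction l generalizing acc with
  | nil => simp
  | cons a t ih => by_cases h : (a + 1) ∈ lis <;> simp [h, ih]

theorem sum_filter_add_sum_filter_not_int (l : List Int) (p : Int → Bool) :
    (l.filter p).sum + (l.filter (fun x => !p x)).sum = l.sum := by
  induction l with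
  | nil => simp
  | cons a t ih => by_cases h : p a <;> simp [h] <;> omega

theorem two_mul_pyRange_sum : ∀ (m : Nat),
    2 * (PySem.List.pyRange 1 ((m : Int) + 1) 1).sum = (m : Int) * ((m : Int) + 1) := by
  intro m
  induction m with
  | zero => simp [PySem.List.pyRange_one_eq_nil]
  | succ k ih =>
    have h : PySem.List.pyRange 1 ((k : Int) + 1 + 1) 1
        = PySem.List.pyRange 1 ((k : Int) + 1) 1 ++ [(k : Int) + 1] :=
      PySem.List.pyRange_one_succ_right (by omega)
    push_cast
    rw [show ((k : Int) + 1 + 1) = ((k : Int) + 1) + 1 by ring, h]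
    simp only [List.sum_append, List.sum_cons, List.sum_nil]
    linarith

theorem floordiv_gauss (n : Int) (hn : 0 ≤ n) :
    PySem.Int.floordiv (n * (n + 1)) 2 = (PySem.List.pyRange 1 (n + 1) 1).sum := by
  obtain ⟨m, rfl⟩ := Int.eq_ofNat_of_zero_le hn
  rw [PySem.Int.floordiv_eq_ediv_of_pos (show (0:Int) < 2 by omega), ← two_mul_pyRange_sum m]
  exact Int.mul_ediv_cancel_left _ (by omega)

theorem present_perm (lis : List Int) (n : Int) :
    ((PySem.List.pyRange 1 (n + 1) 1).filter (fun v => decide (v ∈ lis))).Perm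
      (PySem.Set.ofList (lis.filter (fun x => 1 ≤ x && x ≤ n))) := by
  apply (List.perm_ext_iff_of_nodup
      (List.Nodup.filter _ (PySem.List.nodup_pyRange_one 1 (n + 1)))
      (PySem.Set.nodup_ofList _)).mpr
  intro a
  simp [List.mem_filter, PySem.List.mem_pyRange_one, PySem.Set.mem_ofList]
  constructor
  · rintro ⟨⟨h1, h2⟩, h3⟩; exact ⟨h3, h1, by omega⟩
  · rintro ⟨h3, h1, h2⟩; exact ⟨⟨h1, by omega⟩, h3⟩

-- the two iteration ranges coincide: map (+1) over range(last) = range(1, n+1) with n = max(last,0)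
theorem range_shift (last : Int) :
    ((PySem.List.pyRange 0 last 1).map (· + 1))
      = PySem.List.pyRange 1 ((if last > 0 then last else 0) + 1) 1 := by
  by_cases h : last > 0
  · simp only [h, if_pos]
    rw [PySem.List.pyRange_one 0 last, PySem.List.pyRange_one 1 (last + 1), List.map_map]
    have : (last - 0).toNat = (last + 1 - 1).toNat := by omega
    rw [this]
    exact List.map_congr_left (fun k _ => by simp; ring)
  · simp only [h, if_neg, not_false_iff]
    rw [PySem.List.pyRange_one_eq_nil (by omega), PySem.List.pyRange_one_eq_nil (by omega)]
    simp

theorem sums_agree (lis : List Int) (last : Int) :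
    (((PySem.List.pyRange 0 last 1).filter (fun i => decide (¬ (i + 1) ∈ lis))).map (· + 1)).sum
      = PySem.Int.floordiv ((if last > 0 then last else 0) * ((if last > 0 then last else 0) + 1)) 2
        - (PySem.Set.ofList (lis.filter (fun x => 1 ≤ x && x ≤ (if last > 0 then last else 0)))).sum := by
  set n : Int := if last > 0 then last else 0 with hn
  have hn0 : 0 ≤ n := by rw [hn]; split <;> omega
  have hmapfilter :
      ((PySem.List.pyRange 0 last 1).filter (fun i => decide (¬ (i + 1) ∈ lis))).map (· + 1)
        = (PySem.List.pyRange 1 (n + 1) 1).filter (fun v => decide (¬ v ∈ lis)) := by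
    rw [← range_shift last]
    simp only [List.filter_map]
    rfl
  rw [hmapfilter, floordiv_gauss n hn0,
      ← sum_filter_add_sum_filter_not_int (PySem.List.pyRange 1 (n + 1) 1) (fun v => decide (v ∈ lis)),
      ← (present_perm lis n).sum_eq]
  have : (PySem.List.pyRange 1 (n + 1) 1).filter (fun v => !decide (v ∈ lis))
      = (PySem.List.pyRange 1 (n + 1) 1).filter (fun v => decide (¬ v ∈ lis)) := by
    simp
  rw [← this]
  ring

-- ===== VERDICT (by name: the statement is the Claim_ definition above) =====
theorem missing_no_sum_spec : Claim_equal_missing_no_sum := by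
  intro lis _
  unfold Spec_missing_no_sum missing_no_sum missing_no_sum_alt
  cases lis with
  | nil => rfl
  | cons a t =>
    simp only [List.length_cons, List.isEmpty_cons, gt_iff_lt, Nat.zero_lt_succ, if_true,
      Bool.false_eq_true, if_false]
    rw [foldl_skip_append, List.nil_append, PySem.List.foldl_add (g := fun j => j)]
    rw [List.map_id', sums_agree (a :: t) ((PySem.List.pyGet? (a :: t) (-1)).getD 0)]
    simp
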